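-- pv_equiv track=rewrite | github.com/amiller27/SMITE | test/parse_log.py | parse_smite
-- ===== SOURCE A (Python) =====
-- from enum import Enum, auto
--
-- def splitlines(line):
--     delims = "]})"
--
--     out_line = ""
--     for c in line:
--         out_line += c
--         if c in delims:
--             out_line += "\n"
--
--     return out_line
--
-- def parse_smite(log):
--     class State(Enum):
--         PRE_SMITE = auto()
--         SMITE = auto()
--
--     smite_log = [""]
--     extras = [""]
--
--     state = State.PRE_SMITE
--
--     for line in log.splitlines():
--         target = extras
--
--         if state == State.PRE_SMITE:
--             if line.startswith("METIS RESULT: ["):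
--                 state = State.SMITE
--         elif state == State.SMITE:
--             target = smite_log
--         else:
--             assert False
--
--         target[0] += splitlines(line) + "\n"
--
--     return min(smite_log), min(extras)
-- ===== SOURCE B (Python) =====
-- def splitlines(line):
--     return "".join(c + "\n" if c in "]})" else c for c in line)
--
-- def parse_smite(log):
--     lines = log.splitlines()
--     idx = next((i for i, l in enumerate(lines)
--                 if l.startswith("METIS RESULT: [")), None)
--     if idx is None:
--         prefix, tail = lines, []
--     else:
--         prefix, tail = lines[:idx + 1], lines[idx + 1:]
--     extras = "".join(splitlines(l) + "\n" for l in prefix)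
--     smite_log = "".join(splitlines(l) + "\n" for l in tail)
--     return smite_log, extras
-- ===== Notes on version B (the rewrite author's own statement) =====
-- stated objective: simpler
-- what changed: Replaced the Enum state machine and mutable single-cell lists with a scan for the index of the first 'METIS RESULT: [' line, a take/drop partition of the lines, and two joins; the splitlines helper becomes a one-line join comprehension.
import Mathlib
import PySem

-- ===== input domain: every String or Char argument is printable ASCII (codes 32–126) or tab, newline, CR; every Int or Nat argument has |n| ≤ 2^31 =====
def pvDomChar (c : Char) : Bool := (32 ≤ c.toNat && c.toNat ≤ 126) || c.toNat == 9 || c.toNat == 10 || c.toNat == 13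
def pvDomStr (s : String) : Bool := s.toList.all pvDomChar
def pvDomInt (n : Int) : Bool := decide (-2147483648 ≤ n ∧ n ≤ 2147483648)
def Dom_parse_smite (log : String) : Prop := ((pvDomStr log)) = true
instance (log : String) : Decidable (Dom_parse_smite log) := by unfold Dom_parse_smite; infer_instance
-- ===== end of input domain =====

-- B replaces A's Enum state machine by an index scan for the trigger line, a take/drop
-- partition of the lines and two joins (objective: simpler).

-- ===== PORT A =====
-- splitlines helper: accumulator loop over the characters
def splitlinesA (line : String) : String :=
  line.toList.foldl (fun out c =>
    let out := out ++ String.ofList [c]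
    if ("]})".toList.contains c) then out ++ "\n" else out) ""

-- body of A's for-loop: state false = PRE_SMITE, true = SMITE; the lists mirror Python's
-- one-element mutable lists smite_log / extras
def stepA (st : List String × List String × Bool) (line : String) :
    List String × List String × Bool :=
  let (smite, extras, state) := st
  if state = false then
    let state' := if PySem.Str.startswith line "METIS RESULT: [" then true else false
    (smite, [extras.headD "" ++ (splitlinesA line ++ "\n")], state')
  else
    ([smite.headD "" ++ (splitlinesA line ++ "\n")], extras, state)

def parse_smite (log : String) : String × String :=
  let r := (PySem.Str.splitlines log).foldl stepA ([""], [""], false)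
  (((PySem.List.min? r.1 (fun x => x)).getD ""), ((PySem.List.min? r.2.1 (fun x => x)).getD ""))

-- ===== PORT B =====
-- splitlines helper as in Source B: join of a per-character comprehension
def splitlinesB (line : String) : String :=
  PySem.Str.join "" (line.toList.map (fun c =>
    if ("]})".toList.contains c) then String.ofList [c] ++ "\n" else String.ofList [c]))

def parse_smite_alt (log : String) : String × String :=
  let lines := PySem.Str.splitlines log
  let pt : List String × List String :=
    match lines.findIdx? (fun l => PySem.Str.startswith l "METIS RESULT: [") with
    | none => (lines, [])
    | some i => (lines.take (i + 1), lines.drop (i + 1))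
  (PySem.Str.join "" (pt.2.map (fun l => splitlinesB l ++ "\n")),
   PySem.Str.join "" (pt.1.map (fun l => splitlinesB l ++ "\n")))

-- ===== PRECONDITION & SPEC =====
def Spec_parse_smite (log : String) (out : String × String) : Prop := out = parse_smite_alt log
instance (log : String) (out : String × String) : Decidable (Spec_parse_smite log out) := by unfold Spec_parse_smite; infer_instance

-- ===== CLAIM (what is proved, stated in full; the proofs are below) =====
def Claim_equal_parse_smite : Prop := ∀ (log : String), Dom_parse_smite log → Spec_parse_smite log (parse_smite log)

-- ===== LEMMAS AND PROOFS =====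

-- "".join of a list of strings is their concatenation
def J (ls : List String) : String :=
  PySem.Str.join "" (ls.map (fun l => splitlinesB l ++ "\n"))

-- "" is the neutral "".join: basic facts
theorem join_empty_nil : PySem.Str.join "" ([] : List String) = "" := by
  apply String.toList_inj.mp
  simp [PySem.Str.join, PySem.Chars.join, List.intercalate]

theorem join_empty_cons (x : String) (xs : List String) :
    PySem.Str.join "" (x :: xs) = x ++ PySem.Str.join "" xs := by
  apply String.toList_inj.mp
  simp [PySem.Str.join, PySem.Chars.join]
  cases xs <;> simp [List.intercalate]

theorem J_nil : J [] = "" := by simp [J, join_empty_nil]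

theorem J_cons (l : String) (ls : List String) :
    J (l :: ls) = (splitlinesB l ++ "\n") ++ J ls := by
  simp [J, join_empty_cons]

theorem splitA_fold (cs : List Char) (acc : String) :
    cs.foldl (fun out c =>
      let out := out ++ String.ofList [c]
      if ("]})".toList.contains c) then out ++ "\n" else out) acc
    = acc ++ PySem.Str.join "" (cs.map (fun c =>
        if ("]})".toList.contains c) then String.ofList [c] ++ "\n" else String.ofList [c])) := by
  induction cs generalizing acc with
  | nil => simp [join_empty_nil]
  | cons c cs ih =>
      simp only [List.foldl_cons, List.map_cons, join_empty_cons, ih]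
      split_ifs <;> simp [String.append_assoc]

theorem splitlinesA_eq (line : String) : splitlinesA line = splitlinesB line := by
  simpa [splitlinesA, splitlinesB] using splitA_fold line.toList ""

theorem foldA_post (ls : List String) (s e : String) :
    ls.foldl stepA ([s], [e], true) = ([s ++ J ls], [e], true) := by
  induction ls generalizing s with
  | nil => simp [J_nil]
  | cons l ls ih =>
      have hstep : stepA ([s], [e], true) l = ([s ++ (splitlinesB l ++ "\n")], [e], true) := by
        simp [stepA, splitlinesA_eq]
      rw [List.foldl_cons, hstep, ih, J_cons]
      simp [String.append_assoc]

theorem foldA_pre (ls : List String) (s e : String) :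
    ls.foldl stepA ([s], [e], false) =
      match ls.findIdx? (fun l => PySem.Str.startswith l "METIS RESULT: [") with
      | none => ([s], [e ++ J ls], false)
      | some i => ([s ++ J (ls.drop (i + 1))], [e ++ J (ls.take (i + 1))], true) := by
  induction ls generalizing e with
  | nil => simp [J_nil]
  | cons l ls ih =>
      rw [List.findIdx?_cons]
      by_cases hp : PySem.Str.startswith l "METIS RESULT: [" = true
      · have hp' : PySem.Chars.startswith l.toList ['M','E','T','I','S',' ','R','E','S','U','L','T',':',' ','['] = true := by
          simpa using hp
        have hstep : stepA ([s], [e], false) l = ([s], [e ++ (splitlinesB l ++ "\n")], true) := by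
          simp [stepA, hp', splitlinesA_eq]
        rw [List.foldl_cons, hstep, foldA_post]
        simp only [hp]
        simp [J_cons, J_nil]
      · rw [Bool.not_eq_true] at hp
        have hp' : PySem.Chars.startswith l.toList ['M','E','T','I','S',' ','R','E','S','U','L','T',':',' ','['] = false := by
          simpa using hp
        have hstep : stepA ([s], [e], false) l = ([s], [e ++ (splitlinesB l ++ "\n")], false) := by
          simp [stepA, hp', splitlinesA_eq]
        rw [List.foldl_cons, hstep, ih]
        simp only [hp]
        cases hfi : ls.findIdx? (fun l => PySem.Str.startswith l "METIS RESULT: [") with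
        | none => simp [J_cons, String.append_assoc]
        | some i => simp [J_cons, String.append_assoc]

-- ===== VERDICT (by name: the statement is the Claim_ definition above) =====
theorem parse_smite_spec : Claim_equal_parse_smite := by
  intro log _
  unfold Spec_parse_smite parse_smite parse_smite_alt
  simp only []
  rw [foldA_pre]
  cases hfi : (PySem.Str.splitlines log).findIdx?
      (fun l => PySem.Str.startswith l "METIS RESULT: [") with
  | none =>
      simp [PySem.List.min?_id_cons, J, join_empty_nil]
  | some i =>
      simp [PySem.List.min?_id_cons, J, List.map_take, List.map_drop]
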